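-- pv_equiv track=rewrite | github.com/sergio3101/hackaton-kick-off | backend/app/routers/sessions.py | _pick_coding_topics
-- ===== SOURCE A (Python) =====
-- def _pick_coding_topics(selected: list[str], count: int) -> list[str]:
--     """Темы для кодинг-задач — сгруппированно (повторы темы идут подряд)."""
--     if not selected:
--         return []
--     n = len(selected)
--     base, remainder = divmod(count, n)
--     out: list[str] = []
--     for i, t in enumerate(selected):
--         quota = base + (1 if i < remainder else 0)
--         out.extend([t] * quota)
--     return out[:count]
-- ===== SOURCE B (Python) =====
-- def _pick_coding_topics(selected: list[str], count: int) -> list[str]: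
--     """Темы для кодинг-задач — сгруппированно (повторы темы идут подряд)."""
--     if not selected:
--         return []
--     # progressive fair division: each topic takes the ceiling share of the
--     # slots still remaining among the topics still remaining
--     out: list[str] = []
--     remaining = count
--     left = len(selected)
--     for t in selected:
--         quota = -(-remaining // left)
--         out += [t] * quota
--         remaining -= quota
--         left -= 1
--     return out
-- ===== Notes on version B (the rewrite author's own statement) =====
-- stated objective: alternative
-- what changed: Replaces A's precomputed divmod base/remainder, the enumerate loop with its i<remainder quota conditional and the final out[:count] truncation by a progressive fair-division pass: each topic takes the ceiling share -(-remaining//left) of the slots still remaining among the topics still remaining, so no divmod, no per-index conditional and no truncation are needed.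
import Mathlib
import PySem

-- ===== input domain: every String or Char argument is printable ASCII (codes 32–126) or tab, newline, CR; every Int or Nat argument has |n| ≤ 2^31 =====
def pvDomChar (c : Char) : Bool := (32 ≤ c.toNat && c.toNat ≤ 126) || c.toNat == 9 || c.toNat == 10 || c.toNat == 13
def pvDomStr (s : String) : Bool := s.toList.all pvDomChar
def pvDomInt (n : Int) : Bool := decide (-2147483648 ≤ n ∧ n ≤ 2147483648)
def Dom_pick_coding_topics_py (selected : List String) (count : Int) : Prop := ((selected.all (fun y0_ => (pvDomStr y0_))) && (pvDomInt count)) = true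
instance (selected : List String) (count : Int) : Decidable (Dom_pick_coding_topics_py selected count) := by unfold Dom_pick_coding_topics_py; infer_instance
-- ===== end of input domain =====

-- B replaces A's divmod-precomputed quotas, the enumerate loop with its i<remainder
-- conditional and the final out[:count] truncation by a progressive fair-division pass:
-- each topic takes the ceiling share -(-remaining//left) of the slots still remaining
-- among the topics still remaining; objective: alternative.

-- ===== PORT A =====
def pick_coding_topics_py (selected : List String) (count : Int) : List String :=
  if selected = [] then []
  else
    let n : Int := (selected.length : Int)
    let base : Int := PySem.Int.floordiv count n
    let remainder : Int := PySem.Int.mod count n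
    let out : List String := (PySem.List.enumerate selected).foldl
      (fun out p =>
        let quota : Int := base + (if p.1 < remainder then 1 else 0)
        out ++ PySem.List.pyRepeat [p.2] quota) []
    PySem.List.slice out none (some count)

-- ===== PORT B =====
-- loop state: (out, remaining, left)
def pick_coding_topics_py_alt (selected : List String) (count : Int) : List String :=
  if selected = [] then []
  else
    let st : List String × Int × Int := selected.foldl
      (fun st t =>
        let quota : Int := -(PySem.Int.floordiv (-st.2.1) st.2.2)
        (st.1 ++ PySem.List.pyRepeat [t] quota, st.2.1 - quota, st.2.2 - 1))
      ([], count, (selected.length : Int))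
    st.1

-- ===== PRECONDITION & SPEC =====
def Spec_pick_coding_topics_py (selected : List String) (count : Int) (out : List String) : Prop := out = pick_coding_topics_py_alt selected count
instance (selected : List String) (count : Int) (out : List String) : Decidable (Spec_pick_coding_topics_py selected count out) := by unfold Spec_pick_coding_topics_py; infer_instance

-- ===== CLAIM (what is proved, stated in full; the proofs are below) =====
def Claim_equal_pick_coding_topics_py : Prop := ∀ (selected : List String) (count : Int), Dom_pick_coding_topics_py selected count → Spec_pick_coding_topics_py selected count (pick_coding_topics_py selected count)

-- ===== LEMMAS AND PROOFS =====

-- the progressive fair division, written recursively (proof helper mirroring B's loop)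
def pvRec : (xs : List String) → (count : Int) → List String
  | [], _ => []
  | t :: rest, count =>
      let quota : Int := -(PySem.Int.floordiv (-count) ((t :: rest).length : Int))
      PySem.List.pyRepeat [t] quota ++ pvRec rest (count - quota)

-- B's foldl accumulates exactly pvRec
theorem alt_foldl_eq_rec : ∀ (xs : List String) (out : List String) (c : Int),
    (xs.foldl
      (fun (st : List String × Int × Int) t =>
        let quota : Int := -(PySem.Int.floordiv (-st.2.1) st.2.2)
        (st.1 ++ PySem.List.pyRepeat [t] quota, st.2.1 - quota, st.2.2 - 1))
      (out, c, (xs.length : Int))).1 = out ++ pvRec xs c := by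
  intro xs
  induction xs with
  | nil => intro out c; simp [pvRec]
  | cons t rest ih =>
    intro out c
    rw [List.foldl_cons]
    dsimp only
    have hlen : ((t :: rest).length : Int) - 1 = (rest.length : Int) := by
      simp
    rw [hlen, ih]
    cases rest <;> simp [pvRec, List.append_assoc]

theorem alt_eq_rec (selected : List String) (count : Int) :
    pick_coding_topics_py_alt selected count = pvRec selected count := by
  by_cases hsel : selected = []
  · subst hsel; rfl
  · unfold pick_coding_topics_py_alt
    rw [if_neg hsel]
    exact (alt_foldl_eq_rec selected [] count).trans (by simp)

-- canonical distribution: first r topics get b+1 copies, the rest b copies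
def pvCanon (b r : Int) (xs : List String) : List String :=
  (xs.take r.toNat).flatMap (fun t => List.replicate (b + 1).toNat t)
  ++ (xs.drop r.toNat).flatMap (fun t => List.replicate b.toNat t)

-- a flatMap over enumerate that only uses the element is a flatMap over the list
theorem flatMap_enumerate_snd (xs : List String) (s : Int) (h : String → List String) :
    (PySem.List.enumerate xs s).flatMap (fun p => h p.2) = xs.flatMap h := by
  conv_rhs => rw [← PySem.List.map_snd_enumerate (xs := xs) (s := s)]
  rw [List.flatMap_map]

-- the fair division yields [] whenever count ≤ 0
theorem rec_nonpos : ∀ (xs : List String) (c : Int), c ≤ 0 →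
    pvRec xs c = [] := by
  intro xs
  induction xs with
  | nil => intro c _; rfl
  | cons t rest ih =>
    intro c hc
    unfold pvRec
    dsimp only
    have hn : 0 < ((t :: rest).length : Int) := by simp
    set n : Int := ((t :: rest).length : Int) with hnd
    have hq : -(PySem.Int.floordiv (-c) n) ≤ 0 := by
      have := (PySem.Int.neg_floordiv_neg_eq_iff_of_pos (a := c) (b := n) hn
        (q := -(PySem.Int.floordiv (-c) n))).mpr
      -- instead bound via floordiv: 0 ≤ (-c) // n since -c ≥ 0, n > 0
      have h1 : 0 ≤ PySem.Int.floordiv (-c) n := by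
        rw [PySem.Int.floordiv_eq_ediv_of_pos hn]
        exact Int.ediv_nonneg (by omega) (by omega)
      omega
    have hq' : c ≤ -(PySem.Int.floordiv (-c) n) := by
      -- ceiling of c/n is ≥ c when c ≤ 0 and n ≥ 1: (-c)//n ≤ -c
      have h2 : PySem.Int.floordiv (-c) n ≤ -c := by
        rw [PySem.Int.floordiv_eq_ediv_of_pos hn]
        exact Int.ediv_le_self n (by omega)
      omega
    have hrep : PySem.List.pyRepeat [t] (-(PySem.Int.floordiv (-c) n)) = [] := by
      rw [PySem.List.pyRepeat_singleton]
      have : (-(PySem.Int.floordiv (-c) n)).toNat = 0 := by omega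
      simp [this]
    rw [hrep, List.nil_append]
    exact ih _ (by omega)

-- the fair division computes the canonical distribution when count = b*|xs| + r, 0 ≤ b, 0 ≤ r < |xs| (or r = 0)
theorem rec_canon : ∀ (xs : List String) (b r : Int), 0 ≤ b → 0 ≤ r →
    (r < (xs.length : Int) ∨ r = 0) →
    pvRec xs (b * (xs.length : Int) + r) = pvCanon b r xs := by
  intro xs
  induction xs with
  | nil =>
    intro b r _ hr0 hr
    simp only [List.length_nil, Nat.cast_zero] at hr
    have hre : r = 0 := by omega
    subst hre
    simp [pvRec, pvCanon]
  | cons x rest ih =>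
    intro b r hb0 hr0 hrd
    have hn : 0 < ((x :: rest).length : Int) := by simp
    set n : Int := ((x :: rest).length : Int) with hnd
    have hrn : r < n := by
      rcases hrd with h | h
      · exact h
      · omega
    have hcnt : 0 ≤ b * n + r := by positivity
    unfold pvRec
    dsimp only
    rw [← hnd]
    by_cases hr : 0 < r
    · -- first topic gets b+1; remainder drops by one
      have hq : -(PySem.Int.floordiv (-(b * n + r)) n) = b + 1 := by
        rw [PySem.Int.neg_floordiv_neg_eq_iff_of_pos hn]
        constructor <;> nlinarith
      rw [hq, PySem.List.pyRepeat_singleton]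
      have hrest : r ≤ (rest.length : Int) := by
        have : n = (rest.length : Int) + 1 := by simp [hnd]
        omega
      have hcount' : b * n + r - (b + 1) = b * (rest.length : Int) + (r - 1) := by
        have : n = (rest.length : Int) + 1 := by simp [hnd]
        rw [this]; ring
      rw [hcount', ih b (r - 1) hb0 (by omega) (Or.inl (by omega))]
      -- canon on the cons: take r = x :: take (r-1), drop r = drop (r-1) of rest
      unfold pvCanon
      have htn : r.toNat = (r - 1).toNat + 1 := by omega
      rw [htn]
      simp [List.flatMap_cons, List.append_assoc]
    · -- r = 0: first topic gets b
      have hr0' : r = 0 := by omega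
      subst hr0'
      have hq : -(PySem.Int.floordiv (-(b * n + 0)) n) = b := by
        rw [PySem.Int.neg_floordiv_neg_eq_iff_of_pos hn]
        constructor <;> nlinarith
      rw [hq, PySem.List.pyRepeat_singleton]
      have hcount' : b * n + 0 - b = b * (rest.length : Int) + 0 := by
        have : n = (rest.length : Int) + 1 := by simp [hnd]
        rw [this]; ring
      rw [hcount', ih b 0 hb0 le_rfl (Or.inr rfl)]
      unfold pvCanon
      simp [List.flatMap_cons]

theorem pick_eq (selected : List String) (count : Int) :
    pick_coding_topics_py selected count = pick_coding_topics_py_alt selected count := by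
  by_cases hsel : selected = []
  · subst hsel; rfl
  · unfold pick_coding_topics_py
    rw [if_neg hsel]
    dsimp only
    have hn0 : 0 < (selected.length : Int) := by
      have : selected.length ≠ 0 := by simpa [List.length_eq_zero_iff] using hsel
      omega
    set n : Int := (selected.length : Int) with hn
    set b : Int := PySem.Int.floordiv count n with hb
    set r : Int := PySem.Int.mod count n with hr
    have hr0 : 0 ≤ r := PySem.Int.mod_nonneg count hn0
    have hrlt : r < n := PySem.Int.mod_lt count hn0
    have hsum : b * n + r = count := PySem.Int.floordiv_mul_add_mod count n
    rw [PySem.List.foldl_append_eq_flatMap]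
    simp only [List.nil_append]
    simp only [PySem.List.pyRepeat_singleton]
    by_cases hc : 0 ≤ count
    · -- non-negative count: A builds exactly the canonical distribution, the slice is a no-op
      have hb0 : 0 ≤ b := by nlinarith
      have hr'le : r.toNat ≤ selected.length := by omega
      -- split A's enumerate at r
      conv_lhs => rw [← List.take_append_drop r.toNat selected,
        PySem.List.enumerate_append, List.flatMap_append]
      have hlt : (List.take r.toNat selected).length = r.toNat := by
        simp [List.length_take, Nat.min_eq_left hr'le]
      have hcongh : ∀ p ∈ PySem.List.enumerate (List.take r.toNat selected) 0,
          (fun p : Int × String => List.replicate (b + if p.1 < r then 1 else 0).toNat p.2) p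
            = (fun p : Int × String => List.replicate (b + 1).toNat p.2) p := by
        intro p hp
        rcases (PySem.List.mem_enumerate_iff _ _ _).1 hp with ⟨k, hk, rfl⟩
        rw [hlt] at hk
        beta_reduce
        congr 1
        have hklt : ((0 : Int) + k) < r := by omega
        rw [if_pos hklt]
      have hcongt : ∀ p ∈ PySem.List.enumerate (List.drop r.toNat selected)
            (0 + ((List.take r.toNat selected).length : Int)),
          (fun p : Int × String => List.replicate (b + if p.1 < r then 1 else 0).toNat p.2) p
            = (fun p : Int × String => List.replicate b.toNat p.2) p := by
        intro p hp
        rcases (PySem.List.mem_enumerate_iff _ _ _).1 hp with ⟨k, hk, rfl⟩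
        beta_reduce
        congr 1
        rw [hlt]
        have hge : ¬ ((0 : Int) + (r.toNat : Int) + (k : Int) < r) := by omega
        rw [if_neg hge]
        omega
      rw [List.flatMap_congr hcongh, List.flatMap_congr hcongt,
        flatMap_enumerate_snd, flatMap_enumerate_snd]
      -- the slice [:count] keeps everything: the output already has count elements
      rw [PySem.List.slice_to _ hc]
      have hA : List.take count.toNat
          ((List.take r.toNat selected).flatMap (fun t => List.replicate (b + 1).toNat t)
            ++ (List.drop r.toNat selected).flatMap (fun t => List.replicate b.toNat t))
          = pvCanon b r selected := by
        unfold pvCanon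
        apply List.take_of_length_le
        have h1 : ((List.take r.toNat selected).flatMap
            (fun t => List.replicate (b + 1).toNat t)).length = r.toNat * (b + 1).toNat := by
          simp [List.length_flatMap, Nat.min_eq_left hr'le]
        have h2 : ((List.drop r.toNat selected).flatMap
            (fun t => List.replicate b.toNat t)).length = (selected.length - r.toNat) * b.toNat := by
          simp [List.length_flatMap]
        rw [List.length_append, h1, h2]
        apply Nat.le_of_eq
        have hcast : ((r.toNat * (b + 1).toNat + (selected.length - r.toNat) * b.toNat : Nat) : Int)
            = ((count.toNat : Nat) : Int) := by
          push_cast [hr'le]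
          rw [Int.toNat_of_nonneg hc, Int.toNat_of_nonneg hb0, Int.toNat_of_nonneg hr0,
            Int.toNat_of_nonneg (show (0 : Int) ≤ b + 1 by omega)]
          linear_combination hsum
        exact_mod_cast hcast
      rw [hA]
      rw [alt_eq_rec, show count = b * n + r from hsum.symm]
      exact (rec_canon selected b r hb0 hr0 (Or.inl hrlt)).symm
    · -- negative count: every quota of A is empty and B returns [] as well
      have hbneg : b ≤ -1 := by nlinarith
      have hA : ∀ p : Int × String,
          List.replicate (b + if p.1 < r then 1 else 0).toNat p.2 = ([] : List String) := by
        intro p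
        have : (b + if p.1 < r then 1 else 0).toNat = 0 := by split <;> omega
        simp [this]
      have hL : (PySem.List.enumerate selected).flatMap
          (fun p => List.replicate (b + if p.1 < r then 1 else 0).toNat p.2) = [] :=
        List.flatMap_eq_nil_iff.mpr (fun p _ => hA p)
      rw [hL, alt_eq_rec, rec_nonpos selected count (by omega)]
      simp [PySem.List.slice]

-- ===== VERDICT (by name: the statement is the Claim_ definition above) =====
theorem pick_coding_topics_py_spec : Claim_equal_pick_coding_topics_py := by
  intro selected count _
  unfold Spec_pick_coding_topics_py
  exact pick_eq selected count
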